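-- pv_equiv track=rewrite | github.com/danielraffel/Shipyard | src/shipyard/executor/local.py | _get_stages
-- ===== SOURCE A (Python) =====
-- from typing import Any
--
-- STAGES = ("setup", "configure", "build", "test")
--
-- def _get_stages(
--     validation_config: dict[str, Any], resume_from: str | None = None
-- ) -> list[tuple[str, str]]:
--     """Extract stages from config, optionally skipping to resume_from.
--
--     When resume_from is set (e.g., "test"), earlier stages that already
--     passed are skipped. This enables prepared-state resume: if the build
--     succeeded but tests failed, you can re-run from "test" without
--     rebuilding.
--     """
--     stages: list[tuple[str, str]] = []
--     skipping = resume_from is not None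
--
--     for stage_name in STAGES:
--         cmd = validation_config.get(stage_name)
--         if not cmd:
--             continue
--         if skipping:
--             if stage_name == resume_from:
--                 skipping = False
--             else:
--                 continue
--         stages.append((stage_name, cmd))
--
--     return stages
-- ===== SOURCE B (Python) =====
-- STAGES = ("setup", "configure", "build", "test")
--
-- def _get_stages(validation_config, resume_from=None):
--     """Build the truthy-stage list in one pass, then slice from resume_from."""
--     filtered = [(s, cmd) for s in STAGES if (cmd := validation_config.get(s))]
--     if resume_from is None:
--         return filtered
--     for i, (name, _) in enumerate(filtered):
--         if name == resume_from:
--             return filtered[i:]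
--     return []
-- ===== Notes on version B (the rewrite author's own statement) =====
-- stated objective: simpler
-- what changed: Replaces the single stateful loop with a skipping flag by a build-then-slice decomposition: one comprehension collects the truthy stages, then the result is the suffix of that list starting at resume_from (or the whole list when resume_from is None, or [] when absent).
import Mathlib
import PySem

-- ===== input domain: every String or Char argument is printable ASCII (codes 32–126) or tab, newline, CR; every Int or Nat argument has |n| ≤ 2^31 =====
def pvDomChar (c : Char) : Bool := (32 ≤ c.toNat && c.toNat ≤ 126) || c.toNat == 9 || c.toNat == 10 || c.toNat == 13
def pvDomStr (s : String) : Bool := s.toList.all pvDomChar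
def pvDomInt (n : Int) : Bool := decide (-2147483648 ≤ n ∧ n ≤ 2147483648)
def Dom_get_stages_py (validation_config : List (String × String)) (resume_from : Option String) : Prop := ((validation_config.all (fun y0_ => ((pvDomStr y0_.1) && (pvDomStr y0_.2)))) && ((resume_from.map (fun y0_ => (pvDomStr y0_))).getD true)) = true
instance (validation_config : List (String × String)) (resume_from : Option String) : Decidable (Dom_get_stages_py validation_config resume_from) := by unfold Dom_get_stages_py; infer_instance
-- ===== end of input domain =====

-- B replaces A's single stateful loop (skipping flag) by a build-then-slice decomposition; objective: simpler.


-- ===== PORT A =====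
-- STAGES = ("setup", "configure", "build", "test")
def pvStages : List String := ["setup", "configure", "build", "test"]

-- dict.get(k): first match in the association list (exact for Python's dict under the type convention)
def pvGet (d : List (String × String)) (k : String) : Option String :=
  match d with
  | [] => none
  | (k', v) :: rest => if k' = k then some v else pvGet rest k

-- one iteration of A's loop body: state = (stages, skipping)
def pvStepA (validation_config : List (String × String)) (resume_from : Option String)
    (st : List (String × String) × Bool) (stage_name : String) : List (String × String) × Bool :=
  match pvGet validation_config stage_name with
  | none => st                                  -- cmd is None: 'continue'
  | some cmd =>
    if cmd = "" then st                          -- falsy cmd: 'continue'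
    else if st.2 then
      if some stage_name = resume_from then ((stage_name, cmd) :: st.1, false)
      else st
    else ((stage_name, cmd) :: st.1, st.2)

def get_stages_py (validation_config : List (String × String)) (resume_from : Option String) : List (String × String) :=
  -- stages accumulated in reverse, reversed at the end (append ≙ cons-to-front + reverse)
  (pvStages.foldl (pvStepA validation_config resume_from) ([], resume_from.isSome)).1.reverse

-- ===== PORT B =====
-- filtered = [(s, cmd) for s in STAGES if (cmd := validation_config.get(s))]
def pvFiltered (validation_config : List (String × String)) : List (String × String) :=
  pvStages.filterMap (fun s =>
    match pvGet validation_config s with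
    | none => none
    | some cmd => if cmd = "" then none else some (s, cmd))

-- the linear scan returning filtered[i:] at the first name match, [] if none
def pvScanFrom (resume_from : String) : List (String × String) → List (String × String)
  | [] => []
  | p :: rest => if p.1 = resume_from then p :: rest else pvScanFrom resume_from rest

def get_stages_py_alt (validation_config : List (String × String)) (resume_from : Option String) : List (String × String) :=
  match resume_from with
  | none => pvFiltered validation_config
  | some r => pvScanFrom r (pvFiltered validation_config)

-- ===== PRECONDITION & SPEC =====
def Spec_get_stages_py (validation_config : List (String × String)) (resume_from : Option String) (out : List (String × String)) : Prop := out = get_stages_py_alt validation_config resume_from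
instance (validation_config : List (String × String)) (resume_from : Option String) (out : List (String × String)) : Decidable (Spec_get_stages_py validation_config resume_from out) := by unfold Spec_get_stages_py; infer_instance

-- ===== CLAIM (what is proved, stated in full; the proofs are below) =====
def Claim_equal_get_stages_py : Prop := ∀ (validation_config : List (String × String)) (resume_from : Option String), Dom_get_stages_py validation_config resume_from → Spec_get_stages_py validation_config resume_from (get_stages_py validation_config resume_from)

-- ===== LEMMAS AND PROOFS =====

-- the per-stage filter B applies, shared vocabulary for the lemmas
def pvKeep (vc : List (String × String)) (s : String) : Option (String × String) :=
  match pvGet vc s with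
  | none => none
  | some cmd => if cmd = "" then none else some (s, cmd)

theorem pvFiltered_eq (vc : List (String × String)) :
    pvFiltered vc = pvStages.filterMap (pvKeep vc) := rfl

-- with skipping = false, A's fold just appends every kept stage (in reverse order)
theorem foldA_noskip (vc : List (String × String)) (r : Option String) :
    ∀ (names : List String) (acc : List (String × String)),
      names.foldl (pvStepA vc r) (acc, false)
        = ((names.filterMap (pvKeep vc)).reverse ++ acc, false) := by
  intro names
  induction names with
  | nil => intro acc; simp
  | cons s rest ih =>
    intro acc
    simp only [List.foldl_cons, List.filterMap_cons, pvStepA, pvKeep]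
    cases h : pvGet vc s with
    | none => simpa using ih acc
    | some cmd =>
      by_cases hc : cmd = "" <;> (simp [hc, ih]; rfl)

-- with skipping = true (so r = some rr), the accumulated stages are exactly B's scan result
theorem foldA_skip (vc : List (String × String)) (rr : String) :
    ∀ (names : List String) (acc : List (String × String)),
      (names.foldl (pvStepA vc (some rr)) (acc, true)).1
        = (pvScanFrom rr (names.filterMap (pvKeep vc))).reverse ++ acc := by
  intro names
  induction names with
  | nil => intro acc; simp [pvScanFrom]
  | cons s rest ih =>
    intro acc
    simp only [List.foldl_cons, List.filterMap_cons, pvStepA, pvKeep]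
    cases h : pvGet vc s with
    | none => simpa using ih acc
    | some cmd =>
      by_cases hc : cmd = ""
      · simpa [hc] using ih acc
      · by_cases hr : s = rr
        · simp [hc, hr, pvScanFrom, foldA_noskip]; rfl
        · have hr' : ¬ (some s = some rr) := by simpa using hr
          simp [hc, hr', pvScanFrom, hr, ih]
          rfl

-- ===== VERDICT (by name: the statement is the Claim_ definition above) =====
theorem get_stages_py_spec : Claim_equal_get_stages_py := by
  intro vc r _
  unfold Spec_get_stages_py get_stages_py get_stages_py_alt
  cases r with
  | none =>
    simp [foldA_noskip, pvFiltered_eq]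
  | some rr =>
    simp [foldA_skip, pvFiltered_eq]
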